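-- pv_equiv track=rewrite | github.com/nagaraj-kr/CampusIQ | backend/colleges/management/commands/scrape_colleges_v2.py | _determine_degree_level
-- ===== SOURCE A (Python) =====
-- from typing import List, Dict, Optional, Tuple
--
-- def _determine_degree_level(courses: List[Dict]) -> str:
--     """Determine overall college degree level from courses"""
--     if not courses:
--         return 'MIXED'
--
--     streams = set(course.get('stream', 'UNKNOWN') for course in courses)
--
--     if len(streams) == 1:
--         stream = list(streams)[0]
--         if stream == 'ENGINEERING':
--             return 'ENGINEERING'
--         elif stream == 'ARTS_SCIENCE':
--             return 'ARTS_SCIENCE'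
--         elif stream == 'COMMERCE':
--             return 'COMMERCE'
--
--     return 'MIXED'
-- ===== SOURCE B (Python) =====
-- from functools import reduce
--
-- _LABEL = {'ENGINEERING': 'ENGINEERING',
--           'ARTS_SCIENCE': 'ARTS_SCIENCE',
--           'COMMERCE': 'COMMERCE'}
--
-- def _determine_degree_level(courses):
--     """Determine overall college degree level from courses"""
--     if not courses:
--         return 'MIXED'
--     # Map each course to its degree-level label, then reduce with the
--     # "agree or collapse to MIXED" monoid; 'MIXED' is absorbing, and two
--     # distinct streams can only share the label 'MIXED', so this equals A.
--     labels = (_LABEL.get(c.get('stream', 'UNKNOWN'), 'MIXED') for c in courses)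
--     return reduce(lambda x, y: x if x == y else 'MIXED', labels)
-- ===== Notes on version B (the rewrite author's own statement) =====
-- stated objective: alternative
-- what changed: Instead of collecting distinct streams into a set and classifying the unique member, B maps every course to its degree-level label up front and reduces the labels with an 'agree-or-collapse-to-MIXED' monoid (functools.reduce); no set, no distinctness test, no comparison against the first element.
import Mathlib
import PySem

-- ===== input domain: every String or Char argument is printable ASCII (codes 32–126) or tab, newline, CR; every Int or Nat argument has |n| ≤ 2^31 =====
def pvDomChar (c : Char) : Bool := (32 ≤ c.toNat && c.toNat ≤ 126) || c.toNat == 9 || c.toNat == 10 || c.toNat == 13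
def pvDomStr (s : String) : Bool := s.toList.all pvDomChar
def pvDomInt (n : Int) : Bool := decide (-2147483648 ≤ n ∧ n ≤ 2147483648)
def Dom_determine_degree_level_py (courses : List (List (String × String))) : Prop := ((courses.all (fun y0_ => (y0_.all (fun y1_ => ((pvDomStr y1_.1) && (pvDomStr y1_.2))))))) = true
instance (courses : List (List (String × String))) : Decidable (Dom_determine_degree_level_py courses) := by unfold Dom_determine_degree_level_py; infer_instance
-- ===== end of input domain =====

-- B replaces A's "build a set of streams, classify the unique member" with a
-- map-then-reduce: each course is mapped to its degree-level label and the labels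
-- are folded with an agree-or-collapse-to-MIXED combiner (alternative decomposition).

-- shared helper: course.get('stream', 'UNKNOWN')
def pvStream (c : List (String × String)) : String :=
  (PySem.Dict.mk c).getD "stream" "UNKNOWN"

-- ===== PORT A =====
def determine_degree_level_py (courses : List (List (String × String))) : String :=
  if courses = [] then "MIXED"
  else
    let streams : PySem.Set String := PySem.Set.ofList (courses.map pvStream)
    if streams.length = 1 then
      -- list(streams)[0]: the set is a singleton, so iteration order is irrelevant
      let stream := PySem.List.pyGetD streams 0 ""
      if stream == "ENGINEERING" then "ENGINEERING"
      else if stream == "ARTS_SCIENCE" then "ARTS_SCIENCE"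
      else if stream == "COMMERCE" then "COMMERCE"
      else "MIXED"
    else "MIXED"

-- ===== PORT B =====
-- _LABEL.get(stream, 'MIXED')
def pvLabel (s : String) : String :=
  (PySem.Dict.ofList [("ENGINEERING", "ENGINEERING"),
                      ("ARTS_SCIENCE", "ARTS_SCIENCE"),
                      ("COMMERCE", "COMMERCE")]).getD s "MIXED"

-- the reduce combiner: lambda x, y: x if x == y else 'MIXED'
def pvComb (x y : String) : String := if x == y then x else "MIXED"

def determine_degree_level_py_alt (courses : List (List (String × String))) : String :=
  if courses = [] then "MIXED"
  else
    match courses.map (fun c => pvLabel (pvStream c)) with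
    | [] => "MIXED"   -- unreachable: courses nonempty
    | l :: ls => ls.foldl pvComb l

-- ===== PRECONDITION & SPEC =====
def Spec_determine_degree_level_py (courses : List (List (String × String))) (out : String) : Prop := out = determine_degree_level_py_alt courses
instance (courses : List (List (String × String))) (out : String) : Decidable (Spec_determine_degree_level_py courses out) := by unfold Spec_determine_degree_level_py; infer_instance

-- ===== CLAIM (what is proved, stated in full; the proofs are below) =====
def Claim_equal_determine_degree_level_py : Prop := ∀ (courses : List (List (String × String))), Dom_determine_degree_level_py courses → Spec_determine_degree_level_py courses (determine_degree_level_py courses)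

-- ===== LEMMAS AND PROOFS =====

-- pvLabel as nested ifs
lemma pvLabel_eq (s : String) : pvLabel s =
    if s = "ENGINEERING" then "ENGINEERING"
    else if s = "ARTS_SCIENCE" then "ARTS_SCIENCE"
    else if s = "COMMERCE" then "COMMERCE"
    else "MIXED" := by
  by_cases h1 : s = "ENGINEERING"
  · simp [pvLabel, h1, PySem.Dict.getD, PySem.Dict.get?, PySem.Dict.ofList]; decide
  · by_cases h2 : s = "ARTS_SCIENCE"
    · simp [pvLabel, h2, PySem.Dict.getD, PySem.Dict.get?, PySem.Dict.ofList]; decide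
    · by_cases h3 : s = "COMMERCE"
      · simp [pvLabel, h3, PySem.Dict.getD, PySem.Dict.get?, PySem.Dict.ofList]; decide
      · have e2 : ("ARTS_SCIENCE" == s) = false := by simpa using Ne.symm h2
        have e3 : ("COMMERCE" == s) = false := by simpa using Ne.symm h3
        simp [pvLabel, PySem.Dict.getD, PySem.Dict.get?, PySem.Dict.ofList,
          PySem.Dict.update, PySem.Dict.insert, PySem.Dict.empty,
          PySem.Dict.contains, List.find?, h1, h2, h3, Ne.symm h1, e2, e3]

-- two DISTINCT streams sharing a label both carry label "MIXED"
lemma pvLabel_collide (s t : String) (hne : s ≠ t) (h : pvLabel s = pvLabel t) :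
    pvLabel s = "MIXED" := by
  simp only [pvLabel_eq] at h ⊢
  split_ifs at h ⊢ <;> simp_all

-- "MIXED" is absorbing for the combiner
lemma foldl_comb_mixed (xs : List String) : xs.foldl pvComb "MIXED" = "MIXED" := by
  induction xs with
  | nil => rfl
  | cons x xs ih =>
    by_cases h : x = "MIXED" <;> simp [List.foldl, pvComb, h, ih]

-- the fold equals the seed iff every element equals the seed, else "MIXED"
lemma foldl_comb_char (a : String) (xs : List String) :
    xs.foldl pvComb a = if xs.all (· == a) then a else "MIXED" := by
  induction xs with
  | nil => rfl
  | cons x xs ih =>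
    by_cases h : x = a
    · simp [List.foldl, pvComb, h, ih]
    · have ha : (a == x) = false := by simpa using (Ne.symm h)
      simp [List.foldl, pvComb, ha, foldl_comb_mixed, h]

-- the set built from a constant-valued list is the singleton of that value
lemma pv_ofList_all_eq (a : String) (l : List String) (h : l.all (· == a)) :
    PySem.Set.ofList (a :: l) = [a] := by
  have : ∀ l', l'.all (· == a) → List.foldl PySem.Set.add [a] l' = [a] := by
    intro l' h'
    induction l' with
    | nil => rfl
    | cons x xs ih =>
      rw [List.all_cons, Bool.and_eq_true] at h'
      have hx : x = a := by simpa using h'.1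
      simp [List.foldl, hx, PySem.Set.add, PySem.Set.contains, ih h'.2]
  simpa [PySem.Set.ofList_eq_foldl, List.foldl, PySem.Set.add, PySem.Set.contains] using
    this l h

-- if not all streams equal the first, the set has at least two elements
lemma pv_ofList_not_all (a : String) (l : List String) (h : ¬ l.all (· == a)) :
    (PySem.Set.ofList (a :: l)).length ≠ 1 := by
  simp only [List.all_eq_true, not_forall] at h
  obtain ⟨b, hb, hba⟩ := h
  have hbne : b ≠ a := by simpa using hba
  have ha : a ∈ PySem.Set.ofList (a :: l) := by
    rw [PySem.Set.mem_ofList]; exact List.mem_cons_self ..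
  have hbm : b ∈ PySem.Set.ofList (a :: l) := by
    rw [PySem.Set.mem_ofList]; exact List.mem_cons_of_mem _ hb
  intro hlen
  match hs : PySem.Set.ofList (a :: l), hlen with
  | [x], _ =>
    rw [hs] at ha hbm
    simp at ha hbm
    exact hbne (hbm.trans ha.symm)

-- ===== VERDICT (by name: the statement is the Claim_ definition above) =====
theorem determine_degree_level_py_spec : Claim_equal_determine_degree_level_py := by
  intro courses _
  unfold Spec_determine_degree_level_py determine_degree_level_py determine_degree_level_py_alt
  match courses with
  | [] => rfl
  | c :: rest =>
    simp only [reduceCtorEq, if_false, List.map_cons]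
    rw [foldl_comb_char]
    by_cases hall : (rest.map pvStream).all (· == pvStream c)
    · -- all streams equal the first: A classifies it, B keeps the common label
      have hset := pv_ofList_all_eq (pvStream c) (rest.map pvStream) hall
      have hlab : ((rest.map (fun d => pvLabel (pvStream d))).all (· == pvLabel (pvStream c))) := by
        simp only [List.all_map, List.all_eq_true] at hall ⊢
        intro d hd
        simp [show pvStream d = pvStream c by simpa using hall d hd]
      simp only [hset, List.length_singleton, if_pos hlab]
      have : PySem.List.pyGetD [pvStream c] 0 "" = pvStream c := by
        simp [PySem.List.pyGetD, PySem.List.pyGet?, PySem.List.pyIdx?]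
      rw [this, pvLabel_eq]
      split_ifs <;> simp_all
    · -- streams differ: A returns MIXED; B's fold collapses to MIXED
      have hset := pv_ofList_not_all (pvStream c) (rest.map pvStream) hall
      simp only [if_neg hset]
      by_cases hlab : ((rest.map (fun d => pvLabel (pvStream d))).all (· == pvLabel (pvStream c)))
      · -- labels all agree though streams differ ⇒ the common label is "MIXED"
        simp only [List.all_map, List.all_eq_true, not_forall] at hall
        obtain ⟨d, hd, hdne⟩ := hall
        have hdne' : pvStream d ≠ pvStream c := by simpa using hdne
        simp only [List.all_map, List.all_eq_true] at hlab
        have h1 : pvLabel (pvStream d) = pvLabel (pvStream c) := by simpa using hlab d hd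
        have hcol : pvLabel (pvStream c) = "MIXED" :=
          pvLabel_collide _ _ (Ne.symm hdne') h1.symm
        simp only [List.all_map, List.all_eq_true]
        rw [if_pos (by intro x hx; simpa using hlab x hx), hcol]
      · rw [if_neg hlab]
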